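-- pv_equiv track=rewrite | github.com/meerk40t/meerk40t | translate.py | are_curly_brackets_matched
-- ===== SOURCE A (Python) =====
-- def are_curly_brackets_matched(input_str: str) -> bool:
--     """
--     Checks if curly brackets are properly matched in a string, considering escaped brackets.
--     """
--     stack = []
--     escaped = False
--     for char in input_str:
--         if char == "\\":
--             escaped = True
--             continue
--         if escaped:
--             escaped = False
--             continue
--         if char == "{":
--             stack.append("{")
--         elif char == "}":
--             if not stack:
--                 return False
--             stack.pop()
--     return not stack
-- ===== SOURCE B (Python) =====
-- def are_curly_brackets_matched(input_str: str) -> bool: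
--     depth = 0
--     i = 0
--     n = len(input_str)
--     while i < n:
--         c = input_str[i]
--         if c == "\\":
--             # a run of backslashes escapes the single next character
--             while i < n and input_str[i] == "\\":
--                 i += 1
--             i += 1
--             continue
--         if c == "{":
--             depth += 1
--         elif c == "}":
--             if depth == 0:
--                 return False
--             depth -= 1
--         i += 1
--     return depth == 0
-- ===== Notes on version B (the rewrite author's own statement) =====
-- stated objective: alternative
-- what changed: Replaces A's per-character state machine (escaped flag + a stack of '{' markers) with an index loop that consumes a whole backslash run plus its escaped character in an inner skip step and maintains a single integer depth counter instead of a stack.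
import Mathlib
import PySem

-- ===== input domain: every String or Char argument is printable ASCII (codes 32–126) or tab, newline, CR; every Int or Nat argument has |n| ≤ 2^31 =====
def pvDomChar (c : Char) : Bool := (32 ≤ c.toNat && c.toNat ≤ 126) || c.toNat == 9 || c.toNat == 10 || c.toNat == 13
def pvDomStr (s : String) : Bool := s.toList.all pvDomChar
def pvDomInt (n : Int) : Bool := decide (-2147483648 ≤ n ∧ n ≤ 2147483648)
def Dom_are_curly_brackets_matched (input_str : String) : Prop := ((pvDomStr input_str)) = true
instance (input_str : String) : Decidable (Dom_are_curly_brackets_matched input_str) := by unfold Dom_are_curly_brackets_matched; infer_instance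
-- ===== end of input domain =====

-- B replaces A's escaped-flag + stack state machine by an index loop that skips each
-- backslash run plus its escaped character and keeps an integer depth counter (alternative, same cost).

-- ===== PORT A =====
-- loop of A: stack of "{" strings, escaped flag; early return encoded by recursion
def pvGoA : List Char → List String → Bool → Bool
  | [], stack, _ => stack.isEmpty
  | c :: cs, stack, escaped =>
    if c = '\\' then pvGoA cs stack true
    else if escaped then pvGoA cs stack false
    else if c = '{' then pvGoA cs ("{" :: stack) escaped
    else if c = '}' then
      if stack.isEmpty then false else pvGoA cs stack.tail escaped
    else pvGoA cs stack escaped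

def are_curly_brackets_matched (input_str : String) : Bool :=
  pvGoA input_str.toList [] false

-- ===== PORT B =====
-- B skips a backslash run plus the one character it escapes
def pvSkipEscape : List Char → List Char
  | [] => []
  | c :: cs => if c = '\\' then pvSkipEscape cs else cs

lemma pvSkipEscape_length_le (l : List Char) : (pvSkipEscape l).length ≤ l.length := by
  induction l with
  | nil => simp [pvSkipEscape]
  | cons c cs ih => by_cases h : c = '\\' <;> simp [pvSkipEscape, h] <;> omega

-- B's index loop as recursion on the remaining characters, with an Int depth counter
def pvGoB : List Char → Int → Bool
  | [], depth => depth == 0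
  | c :: cs, depth =>
    if c = '\\' then pvGoB (pvSkipEscape cs) depth
    else if c = '{' then pvGoB cs (depth + 1)
    else if c = '}' then
      if depth == 0 then false else pvGoB cs (depth - 1)
    else pvGoB cs depth
  termination_by l _ => l.length
  decreasing_by all_goals (simp; try exact pvSkipEscape_length_le cs)

def are_curly_brackets_matched_alt (input_str : String) : Bool :=
  pvGoB input_str.toList 0

-- ===== PRECONDITION & SPEC =====
def Spec_are_curly_brackets_matched (input_str : String) (out : Bool) : Prop := out = are_curly_brackets_matched_alt input_str
instance (input_str : String) (out : Bool) : Decidable (Spec_are_curly_brackets_matched input_str out) := by unfold Spec_are_curly_brackets_matched; infer_instance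

-- ===== CLAIM (what is proved, stated in full; the proofs are below) =====
def Claim_equal_are_curly_brackets_matched : Prop := ∀ (input_str : String), Dom_are_curly_brackets_matched input_str → Spec_are_curly_brackets_matched input_str (are_curly_brackets_matched input_str)

-- ===== LEMMAS AND PROOFS =====

-- ===== VERDICT (by name: the statement is the Claim_ definition above) =====
lemma pvGoA_eq_pvGoB (l : List Char) :
    ∀ stack : List String,
      pvGoA l stack false = pvGoB l (stack.length : Int) ∧
      pvGoA l stack true = pvGoB (pvSkipEscape l) (stack.length : Int) := by
  induction l with
  | nil =>
    intro stack
    have h : stack.isEmpty = ((stack.length : Int) == 0) := by cases stack <;> simp <;> omega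
    simp [pvGoA, pvGoB, pvSkipEscape, h]
  | cons c cs ih =>
    intro stack
    constructor
    · by_cases hb : c = '\\'
      · simp [pvGoA, pvGoB, hb, (ih stack).2]
      · by_cases ho : c = '{'
        · simpa [pvGoA, pvGoB, hb, ho] using (ih ("{" :: stack)).1
        · by_cases hc : c = '}'
          · rcases stack with _ | ⟨x, xs⟩
            · simp [pvGoA, pvGoB, hb, ho, hc]
            · have := (ih xs).1
              simp [pvGoA, pvGoB, hb, hc, this]
              omega
          · simp [pvGoA, pvGoB, hb, ho, hc, (ih stack).1]
    · by_cases hb : c = '\\'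
      · simp [pvGoA, pvSkipEscape, hb, (ih stack).2]
      · simp [pvGoA, pvSkipEscape, hb, (ih stack).1]

theorem are_curly_brackets_matched_spec : Claim_equal_are_curly_brackets_matched := by
  intro s _
  unfold Spec_are_curly_brackets_matched are_curly_brackets_matched are_curly_brackets_matched_alt
  simpa using (pvGoA_eq_pvGoB s.toList []).1
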